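-- pv_equiv track=rewrite | github.com/Kiritoabc/tpops_deployment | apps/deployment/user_edit.py | parse_user_edit_block
-- ===== SOURCE A (Python) =====
-- from typing import Dict, List, Optional, Tuple
--
-- def parse_user_edit_block(content: str) -> Tuple[Dict[str, str], Optional[str]]:
--     if not content or not content.strip():
--         return {}, "配置内容为空"
--
--     lines = content.replace("\r\n", "\n").split("\n")
--     in_section = False
--     kv = {}
--     for line in lines:
--         s = line.strip()
--         if not s or s.startswith("#"):
--             continue
--         if s.startswith("[") and s.endswith("]"):
--             sec = s[1:-1].strip().lower()
--             if sec == "user_edit":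
--                 in_section = True
--                 continue
--             if in_section:
--                 break
--             continue
--         if not in_section:
--             continue
--         if "=" not in line:
--             continue
--         k, _, v = line.partition("=")
--         key = k.strip()
--         val = v.strip()
--         if key:
--             kv[key] = val
--
--     if not kv and "[user_edit]" not in content.lower():
--         return {}, "未找到 [user_edit] 段落，请按模板以 [user_edit] 开头填写"
--
--     return kv, None
-- ===== SOURCE B (Python) =====
-- def parse_user_edit_block(content):
--     if not content or not content.strip():
--         return {}, "配置内容为空"
--
--     lines = content.replace("\r\n", "\n").split("\n")
--
--     def header_name(line):
--         s = line.strip()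
--         if s.startswith("[") and s.endswith("]"):
--             return s[1:-1].strip().lower()
--         return None
--
--     # first pass: index of the first [user_edit] header
--     start = next((i for i, line in enumerate(lines)
--                   if header_name(line) == "user_edit"), None)
--
--     kv = {}
--     if start is not None:
--         for line in lines[start + 1:]:
--             s = line.strip()
--             if not s or s.startswith("#"):
--                 continue
--             name = header_name(line)
--             if name is not None:
--                 if name == "user_edit":
--                     continue
--                 break
--             if "=" not in line:
--                 continue
--             k, _, v = line.partition("=")
--             key = k.strip()
--             if key:
--                 kv[key] = v.strip()
--
--     if not kv and "[user_edit]" not in content.lower():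
--         return {}, "未找到 [user_edit] 段落，请按模板以 [user_edit] 开头填写"
--     return kv, None
-- ===== Notes on version B (the rewrite author's own statement) =====
-- stated objective: simpler
-- what changed: A's single scan threading an in_section boolean through every line is replaced by a two-phase decomposition: a first pass locates the first [user_edit] header, then a stateless collect pass gathers key-values until the first foreign header, with header recognition factored into one helper.
import Mathlib
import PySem

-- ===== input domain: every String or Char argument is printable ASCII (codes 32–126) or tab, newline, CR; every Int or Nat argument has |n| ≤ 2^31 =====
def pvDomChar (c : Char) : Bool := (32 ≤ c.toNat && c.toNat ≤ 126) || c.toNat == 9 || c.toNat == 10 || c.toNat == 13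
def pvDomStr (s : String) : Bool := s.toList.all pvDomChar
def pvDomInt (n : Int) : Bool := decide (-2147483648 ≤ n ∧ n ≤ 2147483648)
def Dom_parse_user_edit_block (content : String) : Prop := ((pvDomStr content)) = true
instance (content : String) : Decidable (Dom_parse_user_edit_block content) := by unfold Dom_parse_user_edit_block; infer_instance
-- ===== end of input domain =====

-- B replaces A's single stateful scan (in_section flag) by a find-the-header pass followed by a
-- plain collect-until-foreign-header scan; objective: simpler decomposition, same cost.

-- ===== PORT A =====

-- hand port of line.partition("="): (text before the first '=', text after it);
-- both Pythons call partition only on lines that contain '=', where this is exact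
def pvPartitionEq : List Char → List Char × List Char
  | [] => ([], [])
  | c :: cs =>
    if c = '=' then ([], cs)
    else
      let p := pvPartitionEq cs
      (c :: p.1, p.2)

def pvALoop : List (List Char) → Bool → PySem.Dict String String → PySem.Dict String String
  | [], _, kv => kv
  | line :: rest, inSec, kv =>
    let s := PySem.Chars.strip line
    if s = [] ∨ PySem.Chars.startswith s ['#'] = true then pvALoop rest inSec kv
    else if PySem.Chars.startswith s ['['] = true ∧ PySem.Chars.endswith s [']'] = true then
      let sec := PySem.Chars.lower (PySem.Chars.strip (PySem.Chars.slice s (some 1) (some (-1))))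
      if sec = ['u','s','e','r','_','e','d','i','t'] then pvALoop rest true kv
      else if inSec = true then kv
      else pvALoop rest inSec kv
    else if inSec = false then pvALoop rest inSec kv
    else if PySem.Chars.isIn ['='] line = false then pvALoop rest inSec kv
    else
      let p := pvPartitionEq line
      let key := PySem.Chars.strip p.1
      let val := PySem.Chars.strip p.2
      if key ≠ [] then pvALoop rest inSec (kv.insert (String.ofList key) (String.ofList val))
      else pvALoop rest inSec kv

def parse_user_edit_block (content : String) : (List (String × String)) × Option String :=
  if content.toList = [] ∨ PySem.Chars.strip content.toList = [] then ([], some "配置内容为空")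
  else
    let lines := PySem.Chars.splitOn (PySem.Chars.replace content.toList ['\r', '\n'] ['\n']) ['\n']
    let kv := pvALoop lines false PySem.Dict.empty
    if kv.items = [] ∧ PySem.Chars.isIn ("[user_edit]".toList) (PySem.Chars.lower content.toList) = false then
      ([], some "未找到 [user_edit] 段落，请按模板以 [user_edit] 开头填写")
    else (kv.items, none)

-- ===== PORT B =====

-- header_name(line) from Source B: lowered inner name of a [..] header line, none otherwise
def pvHeaderName? (line : List Char) : Option (List Char) :=
  let s := PySem.Chars.strip line
  if PySem.Chars.startswith s ['['] = true ∧ PySem.Chars.endswith s [']'] = true then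
    some (PySem.Chars.lower (PySem.Chars.strip (PySem.Chars.slice s (some 1) (some (-1)))))
  else none

-- first pass: the lines after the first [user_edit] header (none if there is no such header)
def pvBFind : List (List Char) → Option (List (List Char))
  | [] => none
  | line :: rest =>
    if pvHeaderName? line = some ['u','s','e','r','_','e','d','i','t'] then some rest
    else pvBFind rest

-- second pass: collect key-values, stopping at the first foreign header
def pvBCollect : List (List Char) → PySem.Dict String String → PySem.Dict String String
  | [], kv => kv
  | line :: rest, kv =>
    let s := PySem.Chars.strip line
    if s = [] ∨ PySem.Chars.startswith s ['#'] = true then pvBCollect rest kv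
    else
      match pvHeaderName? line with
      | some name =>
        if name = ['u','s','e','r','_','e','d','i','t'] then pvBCollect rest kv else kv
      | none =>
        if PySem.Chars.isIn ['='] line = false then pvBCollect rest kv
        else
          let p := pvPartitionEq line
          let key := PySem.Chars.strip p.1
          if key ≠ [] then pvBCollect rest (kv.insert (String.ofList key) (String.ofList (PySem.Chars.strip p.2)))
          else pvBCollect rest kv

def parse_user_edit_block_alt (content : String) : (List (String × String)) × Option String :=
  if content.toList = [] ∨ PySem.Chars.strip content.toList = [] then ([], some "配置内容为空")
  else
    let lines := PySem.Chars.splitOn (PySem.Chars.replace content.toList ['\r', '\n'] ['\n']) ['\n']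
    let kv :=
      match pvBFind lines with
      | none => PySem.Dict.empty
      | some rest => pvBCollect rest PySem.Dict.empty
    if kv.items = [] ∧ PySem.Chars.isIn ("[user_edit]".toList) (PySem.Chars.lower content.toList) = false then
      ([], some "未找到 [user_edit] 段落，请按模板以 [user_edit] 开头填写")
    else (kv.items, none)

-- ===== PRECONDITION & SPEC =====
def Spec_parse_user_edit_block (content : String) (out : (List (String × String)) × Option String) : Prop := out = parse_user_edit_block_alt content
instance (content : String) (out : (List (String × String)) × Option String) : Decidable (Spec_parse_user_edit_block content out) := by unfold Spec_parse_user_edit_block; infer_instance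

-- ===== CLAIM (what is proved, stated in full; the proofs are below) =====
def Claim_equal_parse_user_edit_block : Prop := ∀ (content : String), Dom_parse_user_edit_block content → Spec_parse_user_edit_block content (parse_user_edit_block content)

-- ===== LEMMAS AND PROOFS =====

-- a blank or comment line is never a header
theorem pvHeaderName?_of_blank_comment (line : List Char)
    (h : PySem.Chars.strip line = [] ∨ PySem.Chars.startswith (PySem.Chars.strip line) ['#'] = true) :
    pvHeaderName? line = none := by
  unfold pvHeaderName?
  rcases h with h | h
  · simp [h, PySem.Chars.startswith]
  · have h1 : (['#'] : List Char) <+: PySem.Chars.strip line := (PySem.Chars.startswith_iff _ _).1 h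
    rcases h1 with ⟨t, ht⟩
    rw [if_neg]
    rintro ⟨h2, -⟩
    have h3 : (['['] : List Char) <+: PySem.Chars.strip line := (PySem.Chars.startswith_iff _ _).1 h2
    rcases h3 with ⟨t', ht'⟩
    rw [← ht] at ht'
    simp at ht'

-- once inside the section, A's remaining scan is exactly B's collect pass
theorem pvALoop_true_eq_collect (lines : List (List Char)) :
    ∀ kv, pvALoop lines true kv = pvBCollect lines kv := by
  induction lines with
  | nil => intro kv; rfl
  | cons line rest ih =>
    intro kv
    simp only [pvALoop, pvBCollect, pvHeaderName?]
    split_ifs <;> simp_all [ih]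

-- before the section, A's scan is: find the header, then collect (or return kv unchanged)
theorem pvALoop_false_eq_find (lines : List (List Char)) :
    ∀ kv, pvALoop lines false kv =
      (match pvBFind lines with
       | none => kv
       | some rest => pvBCollect rest kv) := by
  induction lines with
  | nil => intro kv; rfl
  | cons line rest ih =>
    intro kv
    have hbc := pvHeaderName?_of_blank_comment line
    simp only [pvALoop, pvBFind, pvHeaderName?] at *
    split_ifs at * <;> simp_all [ih, pvALoop_true_eq_collect]

-- ===== VERDICT (by name: the statement is the Claim_ definition above) =====
theorem parse_user_edit_block_spec : Claim_equal_parse_user_edit_block := by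
  intro content _
  unfold Spec_parse_user_edit_block parse_user_edit_block parse_user_edit_block_alt
  split_ifs with h1
  · rfl
  · simp only [pvALoop_false_eq_find]
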